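-- pv_equiv track=rewrite | github.com/jackruan99/hightowers | hightowers3.py | get_closest_parallel_lines
-- ===== SOURCE A (Python) =====
-- def extend_finite_line(line, limit):
--     extended_line1 = []
--     extended_line2 = []
--     point1, point2 = line[0], line[len(line)-1]
--     changex = point2[0] - point1[0]
--     changey = point2[1] - point1[1]
--     if changex != 0:
--         if changex > 0:
--             step = 1
--         else:
--             step = -1
--             limit *= -1
--         for i in range(step, limit, step):
--             extended_line1.append((point1[0]-i, point1[1]))
--             extended_line2.append((point2[0]+i, point2[1]))
--     else:
--         if changey > 0:
--             step = 1
--         else: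
--             step = -1
--             limit *= -1
--         for i in range(step, limit, step):
--             extended_line1.append((point1[0], point1[1]-i))
--             extended_line2.append((point2[0], point2[1]+i))
--     return extended_line1 + line + extended_line2
--
-- def get_closest_parallel_lines(point, vertical, finite_lines, limit):
--     vertical_lines = []
--     horizontal_lines = []
--     for finite_line in finite_lines:
--         if finite_line[0][0] == finite_line[1][0]:
--             vertical_lines.append(finite_line)
--         else:
--             horizontal_lines.append(finite_line)
--     lines = []
--     if vertical:
--         for i in range(limit):
--             point1 = (point[0]+i, point[1])
--             for line in finite_lines:
--                 if point1 in extend_finite_line(line, limit):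
--                     lines.append(line)
--             point2 = (point[0]-i, point[1])
--             for line in finite_lines:
--                 if point2 in extend_finite_line(line, limit):
--                     lines.append(line)
--     else:
--         for i in range(limit):
--             point1 = (point[0], point[1]+i)
--             for line in finite_lines:
--                 if point1 in extend_finite_line(line, limit):
--                     lines.append(line)
--             point2 = (point[0], point[1]-i)
--             for line in finite_lines:
--                 if point2 in extend_finite_line(line, limit):
--                     lines.append(line)
--     return lines
-- ===== SOURCE B (Python) =====
-- def extend_finite_line(line, limit):
--     extended_line1 = []
--     extended_line2 = []
--     point1, point2 = line[0], line[len(line)-1]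
--     changex = point2[0] - point1[0]
--     changey = point2[1] - point1[1]
--     if changex != 0:
--         if changex > 0:
--             step = 1
--         else:
--             step = -1
--             limit *= -1
--         for i in range(step, limit, step):
--             extended_line1.append((point1[0]-i, point1[1]))
--             extended_line2.append((point2[0]+i, point2[1]))
--     else:
--         if changey > 0:
--             step = 1
--         else:
--             step = -1
--             limit *= -1
--         for i in range(step, limit, step):
--             extended_line1.append((point1[0], point1[1]-i))
--             extended_line2.append((point2[0], point2[1]+i))
--     return extended_line1 + line + extended_line2
--
-- def get_closest_parallel_lines(point, vertical, finite_lines, limit):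
--     # Build a point -> lines index once, instead of re-extending and scanning
--     # every line for every probe point.
--     entries = [(p, line) for line in finite_lines
--                for p in dict.fromkeys(extend_finite_line(line, limit))]
--     index = {}
--     for p, line in entries:
--         index[p] = index.get(p, []) + [line]
--     lines = []
--     if vertical:
--         for i in range(limit):
--             lines += index.get((point[0] + i, point[1]), [])
--             lines += index.get((point[0] - i, point[1]), [])
--     else:
--         for i in range(limit):
--             lines += index.get((point[0], point[1] + i), [])
--             lines += index.get((point[0], point[1] - i), [])
--     return lines
-- ===== Notes on version B (the rewrite author's own statement) =====
-- stated objective: faster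
-- what changed: Instead of re-extending every line and scanning all lines for each of the 2*limit probe points, B extends each line once, builds a dict mapping each distinct extended point to the lines through it, and the probe loop becomes plain indexed lookups.
import Mathlib
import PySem

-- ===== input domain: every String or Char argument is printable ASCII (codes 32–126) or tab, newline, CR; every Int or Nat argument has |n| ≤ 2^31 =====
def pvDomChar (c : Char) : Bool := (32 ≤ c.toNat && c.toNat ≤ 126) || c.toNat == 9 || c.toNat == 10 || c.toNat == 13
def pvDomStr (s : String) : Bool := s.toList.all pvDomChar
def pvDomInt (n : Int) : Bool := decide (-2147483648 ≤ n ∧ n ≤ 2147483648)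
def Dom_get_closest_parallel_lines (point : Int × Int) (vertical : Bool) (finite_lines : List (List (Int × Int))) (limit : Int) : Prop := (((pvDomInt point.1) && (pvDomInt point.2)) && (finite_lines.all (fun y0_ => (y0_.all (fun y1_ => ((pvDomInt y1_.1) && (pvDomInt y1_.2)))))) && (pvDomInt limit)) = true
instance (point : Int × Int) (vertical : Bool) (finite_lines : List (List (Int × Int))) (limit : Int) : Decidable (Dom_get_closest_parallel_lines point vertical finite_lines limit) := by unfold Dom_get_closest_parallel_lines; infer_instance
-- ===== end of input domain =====

-- B replaces A's per-probe re-extension and scan of every line by a point→lines index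
-- built once before the probe phase; same return value wherever the Python A returns.

-- ===== PORT A =====
-- extend_finite_line, shared verbatim by Source A and Source B; the line[0] / line[len-1]
-- indexing is via pyGetD with a junk default, exact under Pre_ (every line nonempty there).
def extendLine (line : List (Int × Int)) (limit : Int) : List (Int × Int) :=
  let point1 := PySem.List.pyGetD line 0 ((0 : Int), (0 : Int))
  let point2 := PySem.List.pyGetD line ((line.length : Int) - 1) ((0 : Int), (0 : Int))
  let changex := point2.1 - point1.1
  let changey := point2.2 - point1.2
  if changex ≠ 0 then
    let step : Int := if changex > 0 then 1 else -1
    let lim : Int := if changex > 0 then limit else -limit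
    let e := (PySem.List.pyRange step lim step).foldl
      (fun (acc : List (Int × Int) × List (Int × Int)) i =>
        (acc.1 ++ [(point1.1 - i, point1.2)], acc.2 ++ [(point2.1 + i, point2.2)])) ([], [])
    e.1 ++ line ++ e.2
  else
    let step : Int := if changey > 0 then 1 else -1
    let lim : Int := if changey > 0 then limit else -limit
    let e := (PySem.List.pyRange step lim step).foldl
      (fun (acc : List (Int × Int) × List (Int × Int)) i =>
        (acc.1 ++ [(point1.1, point1.2 - i)], acc.2 ++ [(point2.1, point2.2 + i)])) ([], [])
    e.1 ++ line ++ e.2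

def get_closest_parallel_lines (point : Int × Int) (vertical : Bool) (finite_lines : List (List (Int × Int))) (limit : Int) : List (List (Int × Int)) :=
  -- A's vertical/horizontal classification loop (its result is never used);
  -- finite_line[0]/[1] via pyGetD with a junk default, exact under Pre_.
  let _cls := finite_lines.foldl
    (fun (acc : List (List (Int × Int)) × List (List (Int × Int))) fl =>
      if (PySem.List.pyGetD fl 0 ((0 : Int), (0 : Int))).1 = (PySem.List.pyGetD fl 1 ((0 : Int), (0 : Int))).1
      then (acc.1 ++ [fl], acc.2)
      else (acc.1, acc.2 ++ [fl])) ([], [])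
  if vertical then
    (PySem.List.pyRange 0 limit 1).foldl (fun lines i =>
      let lines := finite_lines.foldl
        (fun acc line => if (point.1 + i, point.2) ∈ extendLine line limit then acc ++ [line] else acc) lines
      finite_lines.foldl
        (fun acc line => if (point.1 - i, point.2) ∈ extendLine line limit then acc ++ [line] else acc) lines) []
  else
    (PySem.List.pyRange 0 limit 1).foldl (fun lines i =>
      let lines := finite_lines.foldl
        (fun acc line => if (point.1, point.2 + i) ∈ extendLine line limit then acc ++ [line] else acc) lines
      finite_lines.foldl
        (fun acc line => if (point.1, point.2 - i) ∈ extendLine line limit then acc ++ [line] else acc) lines) []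

-- ===== PORT B =====
def get_closest_parallel_lines_alt (point : Int × Int) (vertical : Bool) (finite_lines : List (List (Int × Int))) (limit : Int) : List (List (Int × Int)) :=
  -- entries = [(p, line) for line in finite_lines for p in dict.fromkeys(extend_finite_line(line, limit))]
  let entries := finite_lines.flatMap
    (fun line => (PySem.List.dedup (extendLine line limit)).map (fun p => (p, line)))
  -- index[p] = index.get(p, []) + [line]
  let index := entries.foldl
    (fun (d : PySem.Dict (Int × Int) (List (List (Int × Int)))) e => d.modify e.1 [] (· ++ [e.2]))
    PySem.Dict.empty
  if vertical then
    (PySem.List.pyRange 0 limit 1).foldl (fun lines i =>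
      (lines ++ index.getD (point.1 + i, point.2) []) ++ index.getD (point.1 - i, point.2) []) []
  else
    (PySem.List.pyRange 0 limit 1).foldl (fun lines i =>
      (lines ++ index.getD (point.1, point.2 + i) []) ++ index.getD (point.1, point.2 - i) []) []

-- ===== PRECONDITION & SPEC =====
-- Pre_ excludes exactly the inputs where the Python A raises IndexError: a finite_line
-- with fewer than 2 points (finite_line[1] in the classification loop, line[0] in extend).
def Pre_get_closest_parallel_lines (point : Int × Int) (vertical : Bool) (finite_lines : List (List (Int × Int))) (limit : Int) : Prop :=
  ∀ line ∈ finite_lines, 2 ≤ line.length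
instance (point : Int × Int) (vertical : Bool) (finite_lines : List (List (Int × Int))) (limit : Int) : Decidable (Pre_get_closest_parallel_lines point vertical finite_lines limit) := by unfold Pre_get_closest_parallel_lines; infer_instance
def pvWitness_get_closest_parallel_lines : (Int × Int) × Bool × (List (List (Int × Int))) × Int :=
  ((0, 0), true, [[(0, 0), (1, 0)]], 2)

def Spec_get_closest_parallel_lines (point : Int × Int) (vertical : Bool) (finite_lines : List (List (Int × Int))) (limit : Int) (out : List (List (Int × Int))) : Prop := out = get_closest_parallel_lines_alt point vertical finite_lines limit
instance (point : Int × Int) (vertical : Bool) (finite_lines : List (List (Int × Int))) (limit : Int) (out : List (List (Int × Int))) : Decidable (Spec_get_closest_parallel_lines point vertical finite_lines limit out) := by unfold Spec_get_closest_parallel_lines; infer_instance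

-- ===== CLAIM (what is proved, stated in full; the proofs are below) =====
def Claim_equal_get_closest_parallel_lines : Prop := ∀ (point : Int × Int) (vertical : Bool) (finite_lines : List (List (Int × Int))) (limit : Int), Dom_get_closest_parallel_lines point vertical finite_lines limit → Pre_get_closest_parallel_lines point vertical finite_lines limit → Spec_get_closest_parallel_lines point vertical finite_lines limit (get_closest_parallel_lines point vertical finite_lines limit)

-- ===== LEMMAS AND PROOFS =====

-- On a duplicate-free list, filtering for one element yields it once or not at all.
theorem filter_beq_of_nodup {α : Type} [BEq α] [LawfulBEq α] (l : List α) (h : l.Nodup) (c : α) :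
    l.filter (fun x => x == c) = if c ∈ l then [c] else [] := by
  induction l with
  | nil => simp
  | cons a t ih =>
    rcases List.nodup_cons.mp h with ⟨ha, ht⟩
    by_cases hac : a = c
    · subst hac
      simp [List.filter_cons, beq_iff_eq, ih ht, ha]
    · simp [List.filter_cons, beq_iff_eq, hac, ih ht, Ne.symm hac]

-- The index bucket at c is exactly the lines whose extension contains c, in order.
theorem bucket_eq (finite_lines : List (List (Int × Int))) (limit : Int) (c : Int × Int) :
    ((finite_lines.flatMap
        (fun line => (PySem.List.dedup (extendLine line limit)).map (fun p => (p, line)))).foldl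
      (fun (d : PySem.Dict (Int × Int) (List (List (Int × Int)))) e => d.modify e.1 [] (· ++ [e.2]))
      PySem.Dict.empty).getD c []
    = finite_lines.filter (fun line => decide (c ∈ extendLine line limit)) := by
  rw [PySem.Dict.getD_foldl_modify_append]
  simp only [PySem.Dict.getD_empty, List.nil_append]
  induction finite_lines with
  | nil => rfl
  | cons line rest ih =>
    simp only [List.flatMap_cons, List.filter_append, List.map_append, ih, List.filter_cons]
    rw [List.filter_map]
    rw [show ((fun (p : (Int × Int) × List (Int × Int)) => p.1 == c) ∘ (fun p : Int × Int => (p, line)))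
        = (fun x : Int × Int => x == c) from rfl]
    rw [filter_beq_of_nodup _ (PySem.List.nodup_dedup _) c]
    by_cases hc : c ∈ extendLine line limit
    · simp [hc, PySem.List.mem_dedup]
    · simp [hc, PySem.List.mem_dedup]

-- ===== VERDICT (by name: the statement is the Claim_ definition above) =====
theorem get_closest_parallel_lines_spec : Claim_equal_get_closest_parallel_lines := by
  intro point vertical finite_lines limit _hdom _hpre
  unfold Spec_get_closest_parallel_lines
  unfold get_closest_parallel_lines get_closest_parallel_lines_alt
  cases vertical <;>
  · simp only [if_true, if_false, Bool.false_eq_true]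
    refine PySem.List.foldl_congr_mem _ _ _ _ ?_
    intro acc i _
    rw [PySem.List.foldl_append_ite_eq_filter, PySem.List.foldl_append_ite_eq_filter,
      bucket_eq, bucket_eq]
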